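-- pv_equiv track=rewrite | github.com/ictrobot/alevel-coursework | src/ciphers/keyword.py | keyword_mapping
-- ===== SOURCE A (Python) =====
-- from string import ascii_uppercase
--
-- def keyword_mapping(keyword):
--     """Generates the substitution mapping from a keyword"""
--     # letters to be used as the keys
--     input_letters = list(ascii_uppercase)
--     # remaining letters to be mapped
--     mapping_letters = list(ascii_uppercase)
--     mapping = {}
--     for letter in keyword.upper():
--         if letter in mapping_letters:
--             # if the letter hasn't already been mapped, map the next input
--             # letter to it, and remove it from the letters to map
--             mapping[input_letters.pop(0)] = letter
--             mapping_letters.remove(letter)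
--     # map the remaining letters
--     for letter in mapping_letters:
--         mapping[input_letters.pop(0)] = letter
--     return mapping
-- ===== SOURCE B (Python) =====
-- from string import ascii_uppercase
--
-- def keyword_mapping(keyword):
--     """Generates the substitution mapping from a keyword"""
--     # first-occurrence letters of the keyword, in order
--     used = []
--     seen = set()
--     for c in keyword.upper():
--         if c in ascii_uppercase and c not in seen:
--             used.append(c)
--             seen.add(c)
--     # the alphabet letters not used by the keyword, in order
--     remaining = [c for c in ascii_uppercase if c not in used]
--     return dict(zip(ascii_uppercase, used + remaining))
-- ===== Notes on version B (the rewrite author's own statement) =====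
-- stated objective: simpler
-- what changed: B replaces A's interleaved loop mutating three structures with pop(0)/list-remove by a three-stage pipeline: set-based dedup-filter of the keyword's letters, a comprehension for the remaining alphabet, then dict(zip(ascii_uppercase, used + remaining)).
import Mathlib
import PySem

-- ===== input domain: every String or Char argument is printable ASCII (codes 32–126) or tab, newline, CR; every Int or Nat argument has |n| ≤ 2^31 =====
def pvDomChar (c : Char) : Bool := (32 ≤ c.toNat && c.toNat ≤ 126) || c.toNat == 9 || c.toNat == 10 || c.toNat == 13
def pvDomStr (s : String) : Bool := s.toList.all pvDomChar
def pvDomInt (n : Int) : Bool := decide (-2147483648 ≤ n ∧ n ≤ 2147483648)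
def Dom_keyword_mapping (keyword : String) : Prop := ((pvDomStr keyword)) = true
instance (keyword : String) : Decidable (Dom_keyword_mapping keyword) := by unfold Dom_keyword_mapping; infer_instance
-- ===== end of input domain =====

-- B builds the value sequence (keyword's distinct A-Z letters, then the remaining alphabet) first
-- and zips it with A..Z, instead of A's single loop mutating three structures with pop(0)/remove.

-- shared constant: string.ascii_uppercase, as characters and as 1-char strings
def azChars : List Char := ['A','B','C','D','E','F','G','H','I','J','K','L','M',
  'N','O','P','Q','R','S','T','U','V','W','X','Y','Z']

def pvToS (c : Char) : String := String.ofList [c]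

def azS : List String := azChars.map pvToS

-- ===== PORT A =====
-- the loop state: (input_letters, mapping_letters, mapping); pop(0)/remove are guarded
-- pattern matches (the [] case is unreachable: at most 26 insertions ever happen)
def kmStepA (st : List String × List String × PySem.Dict String String) (c : Char) :
    List String × List String × PySem.Dict String String :=
  let letter := pvToS c
  if st.2.1.contains letter then
    match st.1 with
    | [] => st
    | k :: rest => (rest, st.2.1.erase letter, st.2.2.insert k letter)
  else st

def kmStepA2 (p : List String × PySem.Dict String String) (letter : String) :
    List String × PySem.Dict String String :=
  match p.1 with
  | [] => p
  | k :: rest => (rest, p.2.insert k letter)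

def keyword_mapping (keyword : String) : List (String × String) :=
  let st := (PySem.Str.upper keyword).toList.foldl kmStepA (azS, azS, PySem.Dict.empty)
  ((st.2.1.foldl kmStepA2 (st.1, st.2.2)).2).items

-- ===== PORT B =====
def keyword_mapping_alt (keyword : String) : List (String × String) :=
  let used := ((PySem.Str.upper keyword).toList.foldl
      (fun (st : List Char × PySem.Set Char) c =>
        if azChars.contains c && !(PySem.Set.contains st.2 c) then
          (st.1 ++ [c], PySem.Set.add st.2 c)
        else st)
      ([], PySem.Set.empty)).1
  let remaining := azChars.filter (fun c => !(used.contains c))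
  (azChars.map pvToS).zip ((used ++ remaining).map pvToS)

-- ===== PRECONDITION & SPEC =====
def Spec_keyword_mapping (keyword : String) (out : List (String × String)) : Prop := out = keyword_mapping_alt keyword
instance (keyword : String) (out : List (String × String)) : Decidable (Spec_keyword_mapping keyword out) := by unfold Spec_keyword_mapping; infer_instance

-- ===== CLAIM (what is proved, stated in full; the proofs are below) =====
def Claim_equal_keyword_mapping : Prop := ∀ (keyword : String), Dom_keyword_mapping keyword → Spec_keyword_mapping keyword (keyword_mapping keyword)


-- ===== LEMMAS AND PROOFS =====

-- the pure "used letters" fold underlying B's loop (and, via the invariant, A's)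
def gStep (u : List Char) (c : Char) : List Char :=
  if azChars.contains c && !(u.contains c) then u ++ [c] else u

def gUsed (cs : List Char) (u : List Char) : List Char := cs.foldl gStep u

def GoodU (u : List Char) : Prop := u.Nodup ∧ ∀ c ∈ u, c ∈ azChars

-- A's loop state determined by the list of used letters
def stA (u : List Char) : List String × List String × PySem.Dict String String :=
  (azS.drop u.length,
   (azChars.filter (fun c => !(u.contains c))).map pvToS,
   PySem.Dict.mk ((azS.take u.length).zip (u.map pvToS)))

lemma pvToS_inj : Function.Injective pvToS := by
  intro a b h
  have : (pvToS a).toList = (pvToS b).toList := by rw [h]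
  simpa [pvToS] using this

lemma good_gStep (u : List Char) (c : Char) (h : GoodU u) : GoodU (gStep u c) := by
  unfold gStep
  split_ifs with hc
  · simp only [Bool.and_eq_true, Bool.not_eq_true'] at hc
    obtain ⟨hmem, hnot⟩ := hc
    refine ⟨?_, ?_⟩
    · simp only [List.nodup_append, h.1, List.nodup_cons, List.not_mem_nil, not_false_iff,
        List.nodup_nil, and_true, true_and]
      intro a ha b hb
      rcases List.mem_singleton.mp hb with rfl
      intro rfl
      simp [ha] at hnot
    · intro d hd
      rcases List.mem_append.mp hd with hd | hd
      · exact h.2 d hd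
      · simp at hd; subst hd; simpa using hmem
  · exact h

lemma good_gUsed (cs : List Char) : ∀ u, GoodU u → GoodU (gUsed cs u) := by
  induction cs with
  | nil => intro u h; exact h
  | cons c cs ih => intro u h; exact ih _ (good_gStep u c h)

lemma filterLen (u : List Char) (h : GoodU u) :
    (azChars.filter (fun c => !(u.contains c))).length = 26 - u.length := by
  have h1 : (azChars.filter (fun c => u.contains c)).length = u.length :=
    ((List.perm_ext_iff_of_nodup ((by decide : azChars.Nodup).filter _) h.1).mpr
      (by intro a; simp; exact fun ha => h.2 a ha)).length_eq
  have h2 := List.length_eq_length_filter_add (l := azChars) (fun c => u.contains c)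
  have h3 : azChars.length = 26 := by decide
  omega

lemma good_len (u : List Char) (h : GoodU u) : u.length ≤ 26 := by
  have h1 : (azChars.filter (fun c => u.contains c)).length = u.length :=
    ((List.perm_ext_iff_of_nodup ((by decide : azChars.Nodup).filter _) h.1).mpr
      (by intro a; simp; exact fun ha => h.2 a ha)).length_eq
  have := List.length_filter_le (fun c => u.contains c) azChars
  have h3 : azChars.length = 26 := by decide
  omega

lemma azS_length : azS.length = 26 := by decide

lemma azS_nodup : azS.Nodup := by decide

lemma getElem_not_mem_take (n : Nat) (hn : n < 26) : azS[n]'(by rw [azS_length]; exact hn) ∉ azS.take n := by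
  intro hmem
  obtain ⟨i, hi, hEq⟩ := List.getElem_of_mem hmem
  have hi2 : i < n := ((by simpa using hi : i < n ∧ i < azS.length)).1
  rw [List.getElem_take] at hEq
  have : i = n := (List.Nodup.getElem_inj_iff azS_nodup).mp hEq
  omega


lemma set_add_eq (u : List Char) (c : Char) (h : u.contains c = false) :
    PySem.Set.add u c = u ++ [c] := by
  simp [PySem.Set.add]; simpa using h

lemma dict_insert_fresh (m : List (String × String)) (k v : String)
    (h : k ∉ m.map Prod.fst) :
    (PySem.Dict.mk m).insert k v = PySem.Dict.mk (m ++ [(k, v)]) := by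
  have hc : (PySem.Dict.mk m).contains k = false := by
    rw [PySem.Dict.contains_eq_decide_mem_keys]; simpa [PySem.Dict.keys] using h
  apply PySem.Dict.ext; rw [PySem.Dict.items_insert]; simp [hc]

-- A's step preserves the invariant state
lemma stepA_eq (u : List Char) (c : Char) (h : GoodU u) : kmStepA (stA u) c = stA (gStep u c) := by
  have hcond : ((azChars.filter (fun c' => !(u.contains c'))).map pvToS).contains (pvToS c)
      = (azChars.contains c && !(u.contains c)) := by
    rw [Bool.eq_iff_iff]
    simp [List.mem_filter, pvToS_inj.eq_iff]
  unfold kmStepA stA gStep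
  simp only [hcond]
  by_cases hc : (azChars.contains c && !(u.contains c)) = true
  · obtain ⟨hmem, hnotu⟩ : c ∈ azChars ∧ u.contains c = false := by
      simpa [Bool.and_eq_true, Bool.not_eq_true'] using hc
    have hgood' : GoodU (u ++ [c]) := by
      have := good_gStep u c h; unfold gStep at this; rwa [if_pos hc] at this
    have hlt : u.length < 26 := by
      have := good_len _ hgood'; simp at this; omega
    have hnlen : u.length < azS.length := by rw [azS_length]; exact hlt
    have hdrop := List.drop_eq_getElem_cons hnlen
    rw [if_pos hc, if_pos hc, hdrop]
    simp only [Prod.mk.injEq]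
    refine ⟨?_, ?_, ?_⟩
    · simp
    · rw [← List.map_erase pvToS_inj,
        List.Nodup.erase_eq_filter ((by decide : azChars.Nodup).filter _) c,
        List.filter_filter]
      congr 1
      apply List.filter_congr
      intro a _
      rw [Bool.eq_iff_iff]
      simp
      tauto
    · have hlentake : (azS.take u.length).length = (u.map pvToS).length := by
        simp [azS_length]; omega
      rw [dict_insert_fresh _ _ _ (by
        rw [List.map_fst_zip (le_of_eq hlentake)]
        exact getElem_not_mem_take u.length hlt)]
      congr 1
      rw [show (u ++ [c]).length = u.length + 1 by simp]
      rw [List.take_succ_eq_append_getElem hnlen, List.map_append,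
        List.zip_append hlentake]
      simp
  · rw [if_neg hc, if_neg hc]

-- B's step on an equal pair equals the pure step, duplicated
lemma bStep_eq (u : List Char) (c : Char) :
    (if azChars.contains c && !(PySem.Set.contains u c) then
        (u ++ [c], PySem.Set.add u c)
      else ((u, u) : List Char × PySem.Set Char)) = (gStep u c, gStep u c) := by
  unfold gStep
  have hsc : PySem.Set.contains u c = u.contains c := by simp [PySem.Set.contains]
  rw [hsc]
  by_cases hc : (azChars.contains c && !(u.contains c)) = true
  · have hnc : u.contains c = false := by
      simp only [Bool.and_eq_true, Bool.not_eq_true'] at hc; exact hc.2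
    rw [if_pos hc, if_pos hc, set_add_eq u c hnc]
  · rw [if_neg hc, if_neg hc]

lemma afold_eq (cs : List Char) : ∀ u, GoodU u → cs.foldl kmStepA (stA u) = stA (gUsed cs u) := by
  induction cs with
  | nil => intro u h; rfl
  | cons c cs ih =>
    intro u h
    simp only [List.foldl_cons, stepA_eq u c h]
    exact ih _ (good_gStep u c h)

-- B's fold: the two components stay equal, and equal the pure fold
lemma bfold_eq (cs : List Char) : ∀ u : List Char,
    cs.foldl (fun (st : List Char × PySem.Set Char) c =>
        if azChars.contains c && !(PySem.Set.contains st.2 c) then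
          (st.1 ++ [c], PySem.Set.add st.2 c)
        else st) (u, u) = (gUsed cs u, gUsed cs u) := by
  induction cs with
  | nil => intro u; rfl
  | cons c cs ih =>
    intro u
    simp only [List.foldl_cons]
    rw [bStep_eq]
    rw [ih (gStep u c)]
    rfl

-- the second loop appends the zip of the remaining keys with the iterated values
lemma loop2 (vs : List String) : ∀ (j : Nat) (m : List (String × String)),
    m.map Prod.fst = azS.take j → vs.length + j ≤ 26 →
    ((vs.foldl kmStepA2 (azS.drop j, PySem.Dict.mk m)).2).items = m ++ (azS.drop j).zip vs := by
  induction vs with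
  | nil => intro j m hk hl; simp [PySem.Dict.items]
  | cons v vs ih =>
    intro j m hk hl
    have hj : j < 26 := by simp at hl; omega
    have hjlen : j < azS.length := by rw [azS_length]; exact hj
    have hdrop := List.drop_eq_getElem_cons hjlen
    have hfresh : azS[j] ∉ m.map Prod.fst := by rw [hk]; exact getElem_not_mem_take j hj
    rw [List.foldl_cons, hdrop]
    show ((vs.foldl kmStepA2 (azS.drop (j+1), (PySem.Dict.mk m).insert azS[j] v)).2).items = _
    rw [dict_insert_fresh _ _ _ hfresh]
    rw [ih (j+1) (m ++ [(azS[j], v)])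
      (by simp only [List.map_append, hk, List.map_cons, List.map_nil]
          exact (List.take_succ_eq_append_getElem hjlen).symm)
      (by simp at hl ⊢; omega)]
    rw [List.zip_cons_cons, List.append_assoc]
    rfl

lemma good_nil : GoodU [] := ⟨List.nodup_nil, by simp⟩

lemma stA_nil : stA [] = (azS, azS, PySem.Dict.empty) := by
  unfold stA
  simp [azS]
  rfl

theorem keyword_mapping_spec : Claim_equal_keyword_mapping := by
  intro keyword _
  unfold Spec_keyword_mapping keyword_mapping keyword_mapping_alt
  dsimp only
  rw [show (([], PySem.Set.empty) : List Char × PySem.Set Char) = ([], []) from rfl]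
  rw [← stA_nil, afold_eq _ [] good_nil, bfold_eq]
  set u := gUsed (PySem.Str.upper keyword).toList []
  have hg : GoodU u := good_gUsed _ [] good_nil
  have hn : u.length ≤ 26 := good_len u hg
  have hlentake : (azS.take u.length).length = (u.map pvToS).length := by
    simp [azS_length]; omega
  unfold stA
  dsimp only
  rw [loop2 _ u.length _ (by rw [List.map_fst_zip (le_of_eq hlentake)])
    (by rw [List.length_map, filterLen u hg]; omega)]
  have haz : List.map pvToS azChars = azS := rfl
  rw [haz, List.map_append]
  conv_rhs => rw [← List.take_append_drop u.length azS]
  rw [List.zip_append hlentake]
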